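-- pv_equiv track=rewrite | github.com/Chad-O/Practica | CEADA/Python clase/Pruebas/IaP-CL_04_CisnerosP.3.py | resto
-- ===== SOURCE A (Python) =====
-- def resto(x):
--     C = 0
--     if x % 2 != 0:
--         while C <= 20:
--             x = x + (x - 2)
--             x = x - 2
--             C = C + 1
--         return x
--     elif x % 2 == 0:
--         while C <= 15:
--             x = x + (x - 2)
--             x = x - 2
--             C = C + 1
--         return x
-- ===== SOURCE B (Python) =====
-- def resto(x):
--     # Closed form of iterating x -> 2*x - 4 (fixed point 4):
--     # 21 steps when x is odd, 16 steps when x is even.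
--     if x % 2 != 0:
--         return 2**21 * (x - 4) + 4
--     else:
--         return 2**16 * (x - 4) + 4
-- ===== Notes on version B (the rewrite author's own statement) =====
-- stated objective: simpler
-- what changed: Replaces the two fixed-count while loops iterating x -> 2x-4 with the closed form 2^k*(x-4)+4, with k = 21 for odd x and 16 for even x.
import Mathlib
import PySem

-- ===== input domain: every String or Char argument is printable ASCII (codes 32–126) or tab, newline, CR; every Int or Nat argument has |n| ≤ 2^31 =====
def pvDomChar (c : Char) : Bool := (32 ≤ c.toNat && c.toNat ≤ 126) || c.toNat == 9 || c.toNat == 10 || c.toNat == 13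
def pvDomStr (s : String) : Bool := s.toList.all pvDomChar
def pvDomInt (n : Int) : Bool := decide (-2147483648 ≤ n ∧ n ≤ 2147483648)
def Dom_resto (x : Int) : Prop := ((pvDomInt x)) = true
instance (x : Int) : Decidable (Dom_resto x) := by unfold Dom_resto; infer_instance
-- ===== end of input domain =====

-- B replaces A's two fixed-count while loops with the closed form 2^k*(x-4)+4 (simpler).

-- ===== PORT A =====
-- the while loop body: x = x + (x - 2); x = x - 2; run `n` more times
def restoLoop : Nat → Int → Int
  | 0, x => x
  | n + 1, x => restoLoop n ((x + (x - 2)) - 2)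

def resto (x : Int) : Int :=
  if x % 2 ≠ 0 then restoLoop 21 x   -- C runs 0..20 inclusive: 21 iterations
  else restoLoop 16 x                -- C runs 0..15 inclusive: 16 iterations

-- ===== PORT B =====
def resto_alt (x : Int) : Int :=
  if x % 2 ≠ 0 then 2 ^ 21 * (x - 4) + 4
  else 2 ^ 16 * (x - 4) + 4

-- ===== PRECONDITION & SPEC =====
def Spec_resto (x : Int) (out : Int) : Prop := out = resto_alt x
instance (x : Int) (out : Int) : Decidable (Spec_resto x out) := by unfold Spec_resto; infer_instance

-- ===== CLAIM (what is proved, stated in full; the proofs are below) =====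
def Claim_equal_resto : Prop := ∀ (x : Int), Dom_resto x → Spec_resto x (resto x)

-- ===== LEMMAS AND PROOFS =====
theorem restoLoop_closed (n : Nat) (x : Int) : restoLoop n x = 2 ^ n * (x - 4) + 4 := by
  induction n generalizing x with
  | zero => simp [restoLoop]
  | succ n ih =>
    rw [restoLoop, ih]
    ring

-- ===== VERDICT (by name: the statement is the Claim_ definition above) =====
theorem resto_spec : Claim_equal_resto := by
  intro x _
  unfold Spec_resto resto resto_alt
  by_cases h : x % 2 ≠ 0 <;> simp [h, restoLoop_closed]
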